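-- pv_equiv track=rewrite | github.com/YL159/problem_app | problems/1170_Compare_Str_Freq_of_Smallest_Char.py | func
-- ===== SOURCE A (Python) =====
-- def func(word: str):
--     t = 0
--     lex = 'z'
--     for c in word:
--         if c < lex:
--             t = 1
--             lex = c
--         elif c == lex:
--             t += 1
--     return t
-- ===== SOURCE B (Python) =====
-- def func(word: str):
--     if not word:
--         return 0
--     m = min(word)
--     return word.count(m)
-- ===== Notes on version B (the rewrite author's own statement) =====
-- stated objective: simpler
-- what changed: Replaces the fused accumulate-and-track loop with two library scans (take the minimum character, then count its occurrences), which also run at C speed instead of a per-character Python loop.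
-- intended difference: On nonempty words all of whose characters compare above lowercase z, A (whose sentinel starts at lowercase z and never updates there) returns 0, while B returns the count of the word's true smallest character, which is the intended frequency-of-smallest-character behaviour. — e.g. on func("{"): A returns 0, B returns 1
import Mathlib
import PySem

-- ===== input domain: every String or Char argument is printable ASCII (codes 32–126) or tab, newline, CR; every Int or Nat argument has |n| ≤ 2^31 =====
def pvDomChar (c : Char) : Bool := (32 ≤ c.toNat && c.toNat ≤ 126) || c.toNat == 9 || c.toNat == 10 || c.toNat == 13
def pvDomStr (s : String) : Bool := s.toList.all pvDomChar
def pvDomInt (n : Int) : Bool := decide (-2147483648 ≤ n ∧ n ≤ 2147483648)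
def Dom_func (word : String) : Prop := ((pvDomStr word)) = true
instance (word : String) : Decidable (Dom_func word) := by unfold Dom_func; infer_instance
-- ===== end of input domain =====

-- B changes the algorithm (min char, then count it) and fixes A's sentinel corner on words above lowercase z; measured constant-factor faster.

-- ===== PORT A =====
-- literal transliteration: fold the loop state (t, lex) over the characters
def func (word : String) : Int :=
  (word.toList.foldl
    (fun (s : Int × Char) c =>
      if c < s.2 then ((1 : Int), c)
      else if c = s.2 then (s.1 + 1, s.2)
      else s)
    ((0 : Int), 'z')).1

-- ===== PORT B =====
-- literal transliteration of Source B: empty guard, m = min(word), word.count(m)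
def func_alt (word : String) : Int :=
  if word.toList = [] then 0
  else
    match PySem.List.min? word.toList (fun c => c) with
    | some m => (PySem.Str.count word (String.ofList [m]) : Int)
    | none => 0

-- ===== PRECONDITION & SPEC =====
-- On nonempty words all of whose characters compare above lowercase z, A (whose sentinel
-- starts at lowercase z and never updates there) returns 0, while B returns the count of
-- the word's true smallest character, which is the intended frequency-of-smallest-character behaviour.
def D_func (word : String) : Prop :=
  word.toList ≠ [] ∧ ∀ c ∈ word.toList, 'z' < c
instance (word : String) : Decidable (D_func word) := by unfold D_func; infer_instance

def Spec_func (word : String) (out : Int) : Prop := ¬ D_func word → out = func_alt word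
instance (word : String) (out : Int) : Decidable (Spec_func word out) := by unfold Spec_func; infer_instance

def pvDiffWitness_func : String := "{"
def pvDiffWitnessOut_func : Int × Int := (0, 1)

-- ===== CLAIM (what is proved, stated in full; the proofs are below) =====
def Claim_unchanged_func : Prop := ∀ (word : String), Dom_func word → Spec_func word (func word)
def Claim_changed_func : Prop := Dom_func (pvDiffWitness_func) ∧ D_func (pvDiffWitness_func) ∧ func (pvDiffWitness_func) = pvDiffWitnessOut_func.1 ∧ func_alt (pvDiffWitness_func) = pvDiffWitnessOut_func.2 ∧ pvDiffWitnessOut_func.1 ≠ pvDiffWitnessOut_func.2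
def Claim_exact_func : Prop := ∀ (word : String), Dom_func word → D_func word → func word ≠ func_alt word

-- ===== LEMMAS AND PROOFS =====

-- running minimum: fold min is bounded by its seed
theorem foldl_min_le_seed (l : List Char) (a : Char) : l.foldl min a ≤ a := by
  induction l generalizing a with
  | nil => simp
  | cons c l ih => exact le_trans (ih (min a c)) (min_le_left a c)

theorem funcA_fold (l : List Char) (t : Int) (lex : Char) :
    l.foldl
      (fun (s : Int × Char) c =>
        if c < s.2 then ((1 : Int), c)
        else if c = s.2 then (s.1 + 1, s.2)
        else s) (t, lex)
    = ((l.count (l.foldl min lex) : Int) + (if l.foldl min lex = lex then t else 0),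
       l.foldl min lex) := by
  induction l generalizing t lex with
  | nil => simp
  | cons c l ih =>
    simp only [List.foldl_cons]
    by_cases h1 : c < lex
    · have hmin : min lex c = c := min_eq_right (le_of_lt h1)
      have hne : l.foldl min c ≠ lex :=
        fun h => absurd h1 (not_lt.mpr (h ▸ foldl_min_le_seed l c))
      rw [if_pos h1, ih]
      simp only [hmin, Prod.mk.injEq]
      refine ⟨?_, trivial⟩
      simp only [List.count_cons, beq_iff_eq, if_neg hne]
      push_cast
      rw [add_zero]
      congr 1
      exact if_congr eq_comm rfl rfl
    · by_cases h2 : c = lex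
      · subst h2
        rw [if_neg h1, if_pos rfl, ih]
        simp only [min_self, Prod.mk.injEq]
        refine ⟨?_, trivial⟩
        simp only [List.count_cons, beq_iff_eq]
        push_cast
        by_cases hx : l.foldl min c = c
        · rw [if_pos hx, if_pos hx.symm, if_pos hx]; ring
        · rw [if_neg hx, if_neg (fun h => hx h.symm), if_neg hx]; ring
      · have hlt : lex < c := lt_of_le_of_ne (not_lt.mp h1) (fun h => h2 h.symm)
        have hmin : min lex c = lex := min_eq_left (le_of_lt hlt)
        have hne : l.foldl min lex ≠ c :=
          fun h => absurd (h ▸ foldl_min_le_seed l lex) (not_le.mpr hlt)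
        rw [if_neg h1, if_neg h2, ih]
        simp only [hmin, Prod.mk.injEq]
        refine ⟨?_, trivial⟩
        simp only [List.count_cons, beq_iff_eq, if_neg (fun h => hne (Eq.symm h))]
        push_cast
        ring

theorem foldl_min_min (l : List Char) (a b : Char) :
    l.foldl min (min a b) = min a (l.foldl min b) := by
  induction l generalizing a b with
  | nil => simp
  | cons c l ih =>
    simp only [List.foldl_cons]
    rw [min_assoc, ih]

-- Chars.count with a single-character needle is List.count
theorem count_go_single (l : List Char) (c : Char) :
    ∀ (fuel acc : Nat), l.length ≤ fuel →
      PySem.Chars.count.go [c] fuel l acc = acc + l.count c := by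
  induction l with
  | nil => intro fuel acc _; cases fuel <;> simp [PySem.Chars.count.go]
  | cons d l ih =>
    intro fuel acc hf
    cases fuel with
    | zero => simp at hf
    | succ fuel =>
      have hf' : l.length ≤ fuel := by simpa using hf
      by_cases h : d = c
      · subst h
        have hpre : List.isPrefixOf [d] (d :: l) = true := by
          simp [List.isPrefixOf]
        simp only [PySem.Chars.count.go, hpre, if_pos]
        rw [List.length_singleton, List.drop_one, List.tail_cons, ih fuel (acc + 1) hf']
        simp
        omega
      · have hpre2 : List.isPrefixOf [c] (d :: l) = false := by
          simp [List.isPrefixOf]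
          exact fun h' => h h'.symm
        simp only [PySem.Chars.count.go, hpre2, Bool.false_eq_true, if_false]
        rw [ih fuel acc hf']
        simp [h]

theorem chars_count_single (l : List Char) (c : Char) :
    PySem.Chars.count l [c] = l.count c := by
  unfold PySem.Chars.count
  simp only [List.isEmpty_cons, Bool.false_eq_true, if_false]
  simpa using count_go_single l c l.length 0 le_rfl

-- ===== VERDICT (by name: the statement is the Claim_ definition above) =====
theorem func_spec : Claim_unchanged_func := by
  intro word _ hnd
  unfold func func_alt
  rcases hl : word.toList with _ | ⟨c, rest⟩
  · simp
  · rw [if_neg (by simp), PySem.List.min?_id_cons]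
    have hmm := PySem.List.min?_id_cons (x := c) (t := rest)
    have hz : rest.foldl min c ≤ 'z' := by
      unfold D_func at hnd
      rw [hl] at hnd
      push Not at hnd
      rcases hnd (by simp) with ⟨x, hx, hxz⟩
      exact le_trans (PySem.List.min?_isMin hmm x hx) hxz
    have hfold : (c :: rest).foldl min 'z' = rest.foldl min c := by
      have h1 : (c :: rest).foldl min 'z' = rest.foldl min (min 'z' c) := by
        simp [List.foldl_cons]
      rw [h1, foldl_min_min]
      exact min_eq_right hz
    rw [funcA_fold, hfold]
    by_cases h : rest.foldl min c = 'z' <;> simp [h, hl, chars_count_single]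

set_option maxRecDepth 4096 in
theorem func_changed : Claim_changed_func := by
  unfold Claim_changed_func
  refine ⟨by decide, ?_, by decide, by decide, by decide⟩
  unfold D_func
  refine ⟨by simp [pvDiffWitness_func], ?_⟩
  intro c hc
  simp [pvDiffWitness_func] at hc
  subst hc
  decide

theorem func_tight : Claim_exact_func := by
  intro word _ hd
  rcases hd with ⟨hne, hall⟩
  unfold func func_alt
  rcases hl : word.toList with _ | ⟨c, rest⟩
  · exact absurd hl hne
  · rw [hl] at hall
    rw [if_neg (by simp), PySem.List.min?_id_cons]
    have hfold : (c :: rest).foldl min 'z' = 'z' := by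
      have key : ∀ (l : List Char), (∀ x ∈ l, 'z' < x) → l.foldl min 'z' = 'z' := by
        intro l
        induction l with
        | nil => simp
        | cons d l ih =>
          intro h
          simp only [List.foldl_cons]
          rw [min_eq_left (le_of_lt (h d (by simp)))]
          exact ih fun x hx => h x (by simp [hx])
      exact key _ hall
    rw [funcA_fold, hfold]
    have hmm := PySem.List.min?_id_cons (x := c) (t := rest)
    have hmem : rest.foldl min c ∈ c :: rest := PySem.List.min?_mem hmm
    have hzero : (c :: rest).count 'z' = 0 := by
      rw [List.count_eq_zero]
      intro h
      exact lt_irrefl _ (hall 'z' h)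
    have hpos : 0 < (c :: rest).count (rest.foldl min c) := List.count_pos_iff.mpr hmem
    intro h
    simp [hl, chars_count_single, hzero] at h
    omega
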